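-- pv_equiv track=rewrite | github.com/KenanSultan/simic | normalizer/extractors/neptun_website.py | _to_title_case
-- ===== SOURCE A (Python) =====
-- def _to_title_case(name):
--     """Convert ALL CAPS to title case, handling hyphens and numbers."""
--     parts = name.split()
--     result = []
--     for part in parts:
--         if "-" in part:
--             # Handle hyphenated words: COCA-COLA -> Coca-Cola
--             subparts = part.split("-")
--             result.append("-".join(s.capitalize() for s in subparts))
--         else:
--             result.append(part.capitalize())
--     return " ".join(result)
-- ===== SOURCE B (Python) =====
-- def _to_title_case(name):
--     """Single left-to-right character scan: collapse whitespace and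
--     upper/lower-case each character directly via a word-start flag."""
--     out = []
--     start = True        # next letter begins a (sub)word
--     pending = False     # a separating space is owed before the next word
--     for ch in name:
--         if ch.isspace():
--             if out:
--                 pending = True
--             start = True
--         elif ch == "-":
--             if pending:
--                 out.append(" ")
--                 pending = False
--             out.append("-")
--             start = True
--         else:
--             if pending:
--                 out.append(" ")
--                 pending = False
--             out.append(ch.upper() if start else ch.lower())
--             start = False
--     return "".join(out)
-- ===== Notes on version B (the rewrite author's own statement) =====
-- stated objective: alternative
-- what changed: A splits on whitespace, branches per word, re-splits hyphenated words and joins twice; B is a single left-to-right character state machine (word-start flag + pending-space flag) that never builds intermediate word lists.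
import Mathlib
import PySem

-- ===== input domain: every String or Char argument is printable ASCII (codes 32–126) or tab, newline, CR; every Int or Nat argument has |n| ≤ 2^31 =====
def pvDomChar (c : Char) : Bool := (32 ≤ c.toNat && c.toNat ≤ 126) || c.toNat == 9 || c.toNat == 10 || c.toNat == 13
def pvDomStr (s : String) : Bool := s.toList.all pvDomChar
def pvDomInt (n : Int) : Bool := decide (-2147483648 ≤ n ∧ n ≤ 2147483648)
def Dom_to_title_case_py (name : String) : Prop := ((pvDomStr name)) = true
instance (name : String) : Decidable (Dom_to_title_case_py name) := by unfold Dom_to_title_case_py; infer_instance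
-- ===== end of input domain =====

-- B replaces A's split / per-word branch / inner hyphen-split / double join by one
-- character state machine over the string; equal output on the whole domain.

-- ===== PORT A =====
-- s.capitalize(): exact on ASCII (first char upper-cased, the rest lower-cased)
def capA (s : List Char) : List Char :=
  match s with
  | [] => []
  | c :: rest => PySem.Chars.upperChar c :: rest.map PySem.Chars.lowerChar

def to_title_case_py (name : String) : String :=
  let parts := PySem.Chars.split₀ name.toList
  let result := parts.foldl (fun result part =>
    if PySem.Chars.isIn ['-'] part then
      result ++ [PySem.Chars.join ['-'] ((PySem.Chars.splitOn part ['-']).map capA)]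
    else
      result ++ [capA part]) []
  String.ofList (PySem.Chars.join [' '] result)

-- ===== PORT B =====
-- one step of Source B's loop; ch.upper()/ch.lower() are exact on ASCII
def altStep (st : List Char × Bool × Bool) (ch : Char) : List Char × Bool × Bool :=
  let (out, start, pending) := st
  if PySem.Chars.isspace ch then
    (out, true, if out.isEmpty then pending else true)
  else if ch = '-' then
    let out2 := if pending then out ++ [' '] else out
    (out2 ++ ['-'], true, false)
  else
    let out2 := if pending then out ++ [' '] else out
    (out2 ++ [if start then PySem.Chars.upperChar ch else PySem.Chars.lowerChar ch], false, false)

def to_title_case_py_alt (name : String) : String :=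
  String.ofList ((name.toList.foldl altStep ([], true, false)).1)

-- ===== PRECONDITION & SPEC =====
def Spec_to_title_case_py (name : String) (out : String) : Prop := out = to_title_case_py_alt name
instance (name : String) (out : String) : Decidable (Spec_to_title_case_py name out) := by unfold Spec_to_title_case_py; infer_instance

-- ===== CLAIM (what is proved, stated in full; the proofs are below) =====
def Claim_equal_to_title_case_py : Prop := ∀ (name : String), Dom_to_title_case_py name → Spec_to_title_case_py name (to_title_case_py name)

-- ===== LEMMAS AND PROOFS =====

def Tcap : Bool → List Char → List Char
  | _, [] => []
  | start, c :: r =>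
    if c = '-' then '-' :: Tcap true r
    else (if start then PySem.Chars.upperChar c else PySem.Chars.lowerChar c) :: Tcap false r
def Psplit : List Char → List Char → List (List Char)
  | pre, [] => if pre.isEmpty then [] else [pre]
  | pre, c :: r =>
    if PySem.Chars.isspace c then
      (if pre.isEmpty then Psplit [] r else pre :: Psplit [] r)
    else Psplit (pre ++ [c]) r
def Mach : Bool → Bool → Bool → List Char → List Char
  | _, _, _, [] => []
  | e, start, pending, c :: r =>
    if PySem.Chars.isspace c then Mach e true (if e then true else pending) r
    else if c = '-' then (if pending then [' '] else []) ++ '-' :: Mach true true false r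
    else (if pending then [' '] else []) ++
      (if start then PySem.Chars.upperChar c else PySem.Chars.lowerChar c) :: Mach true false false r
def PrestP (l : List Char) : List (List Char) :=
  match l.dropWhile (fun c => !(PySem.Chars.isspace c)) with
  | [] => []
  | _ :: r => Psplit [] r
def Mspr (l : List Char) : List Char :=
  match l.dropWhile (fun c => !(PySem.Chars.isspace c)) with
  | [] => []
  | _ :: r => Mach true true true r

def Qsplit : List Char → List Char → List (List Char)
  | pre, [] => [pre]
  | pre, c :: r => if c = '-' then pre :: Qsplit [] r else Qsplit (pre ++ [c]) r

theorem intercalate_cons_flatMap (sep x : List Char) (ys : List (List Char)) :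
    List.intercalate sep (x :: ys) = x ++ ys.flatMap (fun y => sep ++ y) := by
  induction ys generalizing x with
  | nil => simp [List.intercalate]
  | cons y ys ih =>
    simp only [List.intercalate, List.intersperse] at *
    simp [List.flatten, ih]

theorem intercalate_cons_ne (sep x : List Char) (y : List Char) (ys : List (List Char)) :
    List.intercalate sep (x :: y :: ys) = x ++ sep ++ List.intercalate sep (y :: ys) := by
  rw [intercalate_cons_flatMap, intercalate_cons_flatMap]
  simp

theorem Qsplit_ne (l pre : List Char) : Qsplit pre l ≠ [] := by
  induction l generalizing pre with
  | nil => simp [Qsplit]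
  | cons c r ih => by_cases h : c = '-' <;> simp [Qsplit, h, ih]

theorem capA_append (pre : List Char) (c : Char) (h : pre ≠ []) :
    capA (pre ++ [c]) = capA pre ++ [PySem.Chars.lowerChar c] := by
  cases pre with
  | nil => simp at h
  | cons p pt => simp [capA]

theorem JQ (l : List Char) : ∀ pre,
    PySem.Chars.join ['-'] ((Qsplit pre l).map capA) = capA pre ++ Tcap pre.isEmpty l := by
  induction l with
  | nil =>
    intro pre
    simp [Qsplit, Tcap, PySem.Chars.join, List.intercalate]
  | cons c r ih =>
    intro pre
    by_cases hc : c = '-'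
    · subst hc
      have hne := Qsplit_ne r ([] : List Char)
      obtain ⟨y, ys, hy⟩ : ∃ y ys, Qsplit [] r = y :: ys := by
        cases hq : Qsplit [] r with
        | nil => exact absurd hq hne
        | cons y ys => exact ⟨y, ys, rfl⟩
      simp only [Qsplit, if_true, PySem.Chars.join] at *
      rw [hy]
      simp only [List.map_cons]
      rw [intercalate_cons_ne]
      have h2 := ih ([] : List Char)
      rw [hy] at h2
      simp only [List.map_cons] at h2
      rw [List.append_assoc, h2]
      cases pre <;> simp [Tcap, capA]
    · simp only [Qsplit, if_neg hc]
      rw [ih]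
      cases pre with
      | nil => simp [capA, Tcap, hc]
      | cons p pt =>
        rw [capA_append _ _ (by simp)]
        simp [Tcap, hc]

theorem Tfalse_no_hyphen (l : List Char) (h : '-' ∉ l) :
    Tcap false l = l.map PySem.Chars.lowerChar := by
  induction l with
  | nil => simp [Tcap]
  | cons c r ih =>
    simp only [List.mem_cons, not_or] at h
    have hc : ¬ (c = '-') := fun hh => h.1 hh.symm
    simp [Tcap, hc, ih h.2]

theorem capA_eq_Tcap (l : List Char) (h : '-' ∉ l) : capA l = Tcap true l := by
  cases l with
  | nil => simp [capA, Tcap]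
  | cons c r =>
    simp only [List.mem_cons, not_or] at h
    have hc : ¬ (c = '-') := fun hh => h.1 hh.symm
    simp [capA, Tcap, hc, Tfalse_no_hyphen r h.2]

theorem goOn_eq (fuel : Nat) : ∀ (l cur : List Char) (acc : List (List Char)),
    l.length < fuel →
    PySem.Chars.splitOn.go ['-'] fuel l cur acc = acc.reverse ++ Qsplit cur.reverse l := by
  induction fuel with
  | zero => intro l cur acc h; omega
  | succ f ih =>
    intro l cur acc h
    cases l with
    | nil => simp [PySem.Chars.splitOn.go, Qsplit]
    | cons c r =>
      simp only [PySem.Chars.splitOn.go, Qsplit]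
      by_cases hc : c = '-'
      · subst hc
        have hp : List.isPrefixOf ['-'] ('-' :: r) = true := by simp [List.isPrefixOf]
        rw [if_pos hp]
        simp only [List.length_cons] at h
        rw [ih _ _ _ (by simpa using Nat.lt_of_succ_lt_succ h)]
        simp
      · have hp : List.isPrefixOf ['-'] (c :: r) = false := by
          simp [List.isPrefixOf]; exact fun hh => hc hh.symm
        rw [if_neg (by simp [hp])]
        rw [ih _ _ _ (by simpa using Nat.lt_of_succ_lt_succ h)]
        simp [hc]

theorem g_eq_Tcap (part : List Char) :
    (if PySem.Chars.isIn ['-'] part then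
      PySem.Chars.join ['-'] ((PySem.Chars.splitOn part ['-']).map capA)
    else capA part) = Tcap true part := by
  by_cases h : PySem.Chars.isIn ['-'] part = true
  · rw [if_pos h]
    have : PySem.Chars.splitOn part ['-'] = Qsplit [] part := by
      show PySem.Chars.splitOn.go ['-'] (part.length + 1) part [] [] = _
      rw [goOn_eq _ _ _ _ (by omega)]
      simp
    rw [this, JQ]
    simp [capA]
  · rw [if_neg h]
    apply capA_eq_Tcap
    intro hm
    exact h (by rw [PySem.Chars.isIn_iff_infix]; exact (List.singleton_infix_iff _ _).mpr hm)

theorem LP (l : List Char) : ∀ (pre : List Char), pre ≠ [] →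
    Psplit pre l = (pre ++ l.takeWhile (fun c => !(PySem.Chars.isspace c))) :: PrestP l := by
  induction l with
  | nil => intro pre h; simp [Psplit, PrestP, List.isEmpty_iff, h]
  | cons c r ih =>
    intro pre h
    by_cases hs : PySem.Chars.isspace c
    · have : pre.isEmpty = false := by simp [h]
      simp [Psplit, PrestP, hs, this]
    · simp only [Psplit, if_neg hs]
      rw [ih _ (by simp)]
      simp [PrestP, hs]

theorem A3 (l : List Char) : ∀ (start : Bool),
    Mach true start false l =
      Tcap start (l.takeWhile (fun c => !(PySem.Chars.isspace c))) ++ Mspr l := by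
  induction l with
  | nil => intro start; simp [Mach, Tcap, Mspr]
  | cons c r ih =>
    intro start
    by_cases hs : PySem.Chars.isspace c
    · simp [Mach, hs, Mspr, Tcap]
    · by_cases hc : c = '-'
      · subst hc
        simp [Mach, hs, Mspr, Tcap, ih]
      · simp [Mach, hs, hc, Mspr, Tcap, ih]

theorem A2 (l : List Char) :
    Mach true true true l = (Psplit [] l).flatMap (fun p => ' ' :: Tcap true p) := by
  induction hn : l.length using Nat.strong_induction_on generalizing l with
  | _ n ihn =>
  cases l with
  | nil => simp [Mach, Psplit]
  | cons c r =>
    by_cases hs : PySem.Chars.isspace c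
    · simp only [Mach, if_pos hs, Psplit, List.isEmpty_nil, if_true]
      exact ihn r.length (by simp [← hn]) r rfl
    · have hM : Mspr r = (PrestP r).flatMap (fun p => ' ' :: Tcap true p) := by
        unfold Mspr PrestP
        cases hd : r.dropWhile (fun c => !(PySem.Chars.isspace c)) with
        | nil => simp
        | cons d r' =>
          have hlen : r'.length < n := by
            have := List.length_dropWhile_le (fun c => !(PySem.Chars.isspace c)) r
            rw [hd] at this
            simp only [List.length_cons] at this
            simp [← hn]; omega
          exact ihn r'.length hlen r' rfl
      have hP : Psplit [] (c :: r) = (c :: r.takeWhile (fun c => !(PySem.Chars.isspace c))) :: PrestP r := by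
        simp only [Psplit, if_neg hs, List.nil_append]
        rw [LP _ _ (by simp)]
        rfl
      rw [hP]
      by_cases hc : c = '-'
      · subst hc
        simp only [Mach, if_neg hs, if_true, A3, hM]
        simp [Tcap]
      · simp only [Mach, if_neg hs, if_neg hc, if_true, A3, hM]
        simp [Tcap, hc]

theorem A1 (l : List Char) :
    Mach false true false l = PySem.Chars.join [' '] ((Psplit [] l).map (Tcap true)) := by
  induction l with
  | nil => simp [Mach, Psplit, PySem.Chars.join, List.intercalate]
  | cons c r ih =>
    by_cases hs : PySem.Chars.isspace c
    · simpa [Mach, hs, Psplit] using ih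
    · have hM : Mspr r = (PrestP r).flatMap (fun p => ' ' :: Tcap true p) := by
        unfold Mspr PrestP
        cases hd : r.dropWhile (fun c => !(PySem.Chars.isspace c)) with
        | nil => simp
        | cons d r' => exact A2 r'
      have hP : Psplit [] (c :: r) = (c :: r.takeWhile (fun c => !(PySem.Chars.isspace c))) :: PrestP r := by
        simp only [Psplit, if_neg hs, List.nil_append]
        rw [LP _ _ (by simp)]
        rfl
      rw [hP]
      show Mach false true false (c :: r) = List.intercalate [' '] _
      rw [List.map_cons, intercalate_cons_flatMap]
      by_cases hc : c = '-'
      · subst hc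
        simp only [Mach, if_neg hs, if_neg (Bool.false_ne_true), A3, hM]
        simp [Tcap, List.flatMap_map]
      · simp only [Mach, if_neg hs, if_neg hc, if_neg (Bool.false_ne_true), A3, hM]
        simp [Tcap, hc, List.flatMap_map]

theorem go0_eq (l : List Char) : ∀ (cur : List Char) (accL : List (List Char)),
    PySem.Chars.split₀.go l cur accL = accL.reverse ++ Psplit cur.reverse l := by
  induction l with
  | nil =>
    intro cur acc
    simp only [PySem.Chars.split₀.go, Psplit]
    by_cases h : cur.isEmpty <;> simp_all
  | cons c r ih =>
    intro cur acc
    simp only [PySem.Chars.split₀.go, Psplit]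
    by_cases hs : PySem.Chars.isspace c
    · by_cases h : cur.isEmpty
      · simp_all
      · have : cur.reverse.isEmpty = false := by simp_all [List.isEmpty_iff]
        simp_all
    · have : (c :: cur).reverse = cur.reverse ++ [c] := by simp
      simp_all

theorem appendConsIsEmpty {α : Type} (l l' : List α) (x : α) : (l ++ (x :: l')).isEmpty = false := by
  cases l <;> rfl

theorem foldB (cs : List Char) : ∀ (out : List Char) (start pending : Bool),
    (List.foldl altStep (out, start, pending) cs).1 = out ++ Mach (!out.isEmpty) start pending cs := by
  induction cs with
  | nil => intro out start pending; simp [Mach]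
  | cons c r ih =>
    intro out start pending
    by_cases hs : PySem.Chars.isspace c
    · simp only [List.foldl_cons, altStep, if_pos hs, Mach]
      rw [ih]
      cases h : out.isEmpty <;> simp_all
    · by_cases hc : c = '-'
      · subst hc
        simp only [List.foldl_cons, altStep, if_neg hs, Mach]
        rw [ih]
        cases pending <;> simp [appendConsIsEmpty]
      · simp only [List.foldl_cons, altStep, if_neg hs, if_neg hc, Mach]
        rw [ih]
        cases pending <;> simp [appendConsIsEmpty]

-- ===== VERDICT (by name: the statement is the Claim_ definition above) =====
theorem to_title_case_py_spec : Claim_equal_to_title_case_py := by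
  intro name _
  show to_title_case_py name = to_title_case_py_alt name
  unfold to_title_case_py to_title_case_py_alt
  rw [foldB]
  simp only [List.isEmpty_nil, Bool.not_true, List.nil_append, A1]
  have hsplit : PySem.Chars.split₀ name.toList = Psplit [] name.toList := by
    show PySem.Chars.split₀.go name.toList [] [] = _
    rw [go0_eq]
    simp
  have hfun : (fun (result : List (List Char)) part =>
      if PySem.Chars.isIn ['-'] part then
        result ++ [PySem.Chars.join ['-'] ((PySem.Chars.splitOn part ['-']).map capA)]
      else result ++ [capA part])
      = (fun (result : List (List Char)) part => result ++
          [if PySem.Chars.isIn ['-'] part then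
            PySem.Chars.join ['-'] ((PySem.Chars.splitOn part ['-']).map capA)
          else capA part]) := by
    funext result part; split <;> rfl
  rw [hsplit, hfun, PySem.List.foldl_append_singleton_eq_map
    (fun part => if PySem.Chars.isIn ['-'] part then
      PySem.Chars.join ['-'] ((PySem.Chars.splitOn part ['-']).map capA)
    else capA part)]
  have : (fun part => if PySem.Chars.isIn ['-'] part then
      PySem.Chars.join ['-'] ((PySem.Chars.splitOn part ['-']).map capA)
    else capA part) = Tcap true := funext g_eq_Tcap
  rw [this]
  simp
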